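-- pv_equiv track=rewrite | github.com/wangying1586/PASA | train.py | get_dataset_class_names
-- ===== SOURCE A (Python) =====
-- def get_dataset_class_names(dataset, task_type):
--     """Get class names for different datasets"""
--     if dataset == "SPRSound":
--         if task_type == "11":
--             return ['Normal', 'Adventitious']
--         elif task_type == "12":
--             return ['Normal', 'Rhonchi', 'Wheeze', 'Stridor', 'Coarse Crackle', 'Fine Crackle', 'Wheeze+Crackle']
--         elif task_type == "21":
--             return ['Normal', 'Poor Quality', 'Adventitious']
--         elif task_type == "22":
--             return ['Normal', 'Poor Quality', 'CAS', 'DAS', 'CAS & DAS']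
--     elif dataset == "ICBHI":
--         if task_type == "binary":
--             return ['Normal', 'Abnormal']
--         elif task_type == "multiclass":
--             return ['Normal', 'Crackle', 'Wheeze', 'Wheeze+Crackle']
--     elif dataset == "CirCor":
--         return ['Present', 'Absent', 'Unknown']
--     return [f"Class {i}" for i in range(10)]
-- ===== SOURCE B (Python) =====
-- _ICBHI = {
--     "binary": ["Normal", "Abnormal"],
--     "multiclass": ["Normal", "Crackle", "Wheeze", "Wheeze+Crackle"],
-- }
--
-- def get_dataset_class_names(dataset, task_type):
--     """Get class names for different datasets"""
--     if dataset == "SPRSound" and task_type in ("11", "12", "21", "22"):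
--         # Decode the two-digit task code: level digit 2 adds 'Poor Quality',
--         # granularity digit 1 = coarse ('Adventitious'), 2 = the fine label set
--         # of that level. This composes the four lists instead of enumerating them.
--         level, gran = task_type[0], task_type[1]
--         names = ["Normal"]
--         if level == "2":
--             names.append("Poor Quality")
--         if gran == "1":
--             names.append("Adventitious")
--         elif level == "1":
--             names += ["Rhonchi", "Wheeze", "Stridor", "Coarse Crackle", "Fine Crackle", "Wheeze+Crackle"]
--         else:
--             names += ["CAS", "DAS", "CAS & DAS"]
--         return names
--     if dataset == "CirCor":
--         return ["Present", "Absent", "Unknown"]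
--     names = _ICBHI.get(task_type) if dataset == "ICBHI" else None
--     if names is not None:
--         return names
--     return ["Class %d" % i for i in range(10)]
-- ===== Notes on version B (the rewrite author's own statement) =====
-- stated objective: alternative
-- what changed: B decodes SPRSound's two-digit task code and composes the class list from parts (Normal, + 'Poor Quality' for level 2, + the coarse label or the level's fine label set) instead of enumerating the four hardcoded lists; CirCor is a flat guarded return and ICBHI is a dict .get whose miss falls to the Class-i default.
import Mathlib
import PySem

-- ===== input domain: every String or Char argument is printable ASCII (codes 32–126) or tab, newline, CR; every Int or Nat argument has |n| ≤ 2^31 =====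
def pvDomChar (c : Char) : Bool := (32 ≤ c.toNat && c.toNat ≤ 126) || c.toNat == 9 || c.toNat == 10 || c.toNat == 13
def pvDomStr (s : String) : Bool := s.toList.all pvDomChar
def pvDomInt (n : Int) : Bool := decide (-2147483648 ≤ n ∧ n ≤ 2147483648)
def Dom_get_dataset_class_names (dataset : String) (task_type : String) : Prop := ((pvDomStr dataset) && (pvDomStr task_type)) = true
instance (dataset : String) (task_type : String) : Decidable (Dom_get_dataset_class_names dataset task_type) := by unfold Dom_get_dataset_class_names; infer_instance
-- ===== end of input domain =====

-- B composes SPRSound's class list from the decoded two-digit task code instead of enumerating four hardcoded lists (alternative decomposition, same cost).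

-- ===== PORT A =====
def get_dataset_class_names (dataset : String) (task_type : String) : List String :=
  if dataset = "SPRSound" then
    if task_type = "11" then ["Normal", "Adventitious"]
    else if task_type = "12" then ["Normal", "Rhonchi", "Wheeze", "Stridor", "Coarse Crackle", "Fine Crackle", "Wheeze+Crackle"]
    else if task_type = "21" then ["Normal", "Poor Quality", "Adventitious"]
    else if task_type = "22" then ["Normal", "Poor Quality", "CAS", "DAS", "CAS & DAS"]
    else (PySem.List.pyRange 0 10 1).map (fun i => "Class " ++ PySem.Int.toStr i)
  else if dataset = "ICBHI" then
    if task_type = "binary" then ["Normal", "Abnormal"]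
    else if task_type = "multiclass" then ["Normal", "Crackle", "Wheeze", "Wheeze+Crackle"]
    else (PySem.List.pyRange 0 10 1).map (fun i => "Class " ++ PySem.Int.toStr i)
  else if dataset = "CirCor" then ["Present", "Absent", "Unknown"]
  else (PySem.List.pyRange 0 10 1).map (fun i => "Class " ++ PySem.Int.toStr i)

-- ===== PORT B =====
-- decode task_type[0]/task_type[1] and compose the SPRSound class list (the [] arm is unreachable: callers pass a two-digit code)
def sprCompose (task_type : String) : List String :=
  match task_type.toList with
  | level :: gran :: _ =>
    let names := ["Normal"] ++ (if level = '2' then ["Poor Quality"] else [])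
    names ++ (if gran = '1' then ["Adventitious"]
              else if level = '1' then ["Rhonchi", "Wheeze", "Stridor", "Coarse Crackle", "Fine Crackle", "Wheeze+Crackle"]
              else ["CAS", "DAS", "CAS & DAS"])
  | _ => []

-- the module-level dict _ICBHI, as an association list
def icbhiTable : List (String × List String) :=
  [("binary", ["Normal", "Abnormal"]),
   ("multiclass", ["Normal", "Crackle", "Wheeze", "Wheeze+Crackle"])]

def get_dataset_class_names_alt (dataset : String) (task_type : String) : List String :=
  if dataset = "SPRSound" ∧ (task_type = "11" ∨ task_type = "12" ∨ task_type = "21" ∨ task_type = "22") then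
    sprCompose task_type
  else if dataset = "CirCor" then ["Present", "Absent", "Unknown"]
  else
    match (if dataset = "ICBHI" then icbhiTable.lookup task_type else none) with
    | some names => names
    | none => (PySem.List.pyRange 0 10 1).map (fun i => "Class " ++ PySem.Int.toStr i)

-- ===== PRECONDITION & SPEC =====
def Spec_get_dataset_class_names (dataset : String) (task_type : String) (out : List String) : Prop := out = get_dataset_class_names_alt dataset task_type
instance (dataset : String) (task_type : String) (out : List String) : Decidable (Spec_get_dataset_class_names dataset task_type out) := by unfold Spec_get_dataset_class_names; infer_instance

-- ===== CLAIM (what is proved, stated in full; the proofs are below) =====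
def Claim_equal_get_dataset_class_names : Prop := ∀ (dataset : String) (task_type : String), Dom_get_dataset_class_names dataset task_type → Spec_get_dataset_class_names dataset task_type (get_dataset_class_names dataset task_type)

-- ===== LEMMAS AND PROOFS =====

-- ===== VERDICT (by name: the statement is the Claim_ definition above) =====
theorem get_dataset_class_names_spec : Claim_equal_get_dataset_class_names := by
  intro d t _
  unfold Spec_get_dataset_class_names get_dataset_class_names get_dataset_class_names_alt
  by_cases hd1 : d = "SPRSound"
  · subst hd1
    by_cases h1 : t = "11"
    · subst h1; decide
    · by_cases h2 : t = "12"
      · subst h2; decide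
      · by_cases h3 : t = "21"
        · subst h3; decide
        · by_cases h4 : t = "22"
          · subst h4; decide
          · simp [h1, h2, h3, h4]
  · by_cases hd2 : d = "ICBHI"
    · subst hd2
      by_cases h1 : t = "binary"
      · subst h1; decide
      · by_cases h2 : t = "multiclass"
        · subst h2; decide
        · have e1 : (t == "binary") = false := by simp [h1]
          have e2 : (t == "multiclass") = false := by simp [h2]
          simp [icbhiTable, List.lookup, e1, e2, hd1, h1, h2]
    · by_cases hd3 : d = "CirCor"
      · subst hd3; simp [hd1, hd2]
      · simp [hd1, hd2, hd3]
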